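-- pv_equiv track=rewrite | github.com/baebug/algorithm_study | py/algorithm/swea/d3/1220.py | find
-- ===== SOURCE A (Python) =====
-- def find(string):
--     idx = 0
--     count = 0
--
--     while 1:
--         if string.find('2', idx) != -1:
--             idx = string.find('2', idx) + 1
--             if string.find('1', idx) != -1:
--                 count += 1
--                 idx = string.find('1', idx) + 1
--             else:
--                 return count
--         else:
--             return count
-- ===== SOURCE B (Python) =====
-- def find(string):
--     # Single explicit state-machine pass: seek a '2', then seek a following '1'.
--     count = 0
--     looking_for_2 = True
--     for ch in string:
--         if looking_for_2:
--             if ch == '2':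
--                 looking_for_2 = False
--         elif ch == '1':
--             count += 1
--             looking_for_2 = True
--     return count
-- ===== Notes on version B (the rewrite author's own statement) =====
-- stated objective: simpler
-- what changed: Replaced the find-and-jump while loop (repeated string.find calls with an index cursor) by a single character-by-character pass maintaining a seeking-2/seeking-1 state flag and a counter.
import Mathlib
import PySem

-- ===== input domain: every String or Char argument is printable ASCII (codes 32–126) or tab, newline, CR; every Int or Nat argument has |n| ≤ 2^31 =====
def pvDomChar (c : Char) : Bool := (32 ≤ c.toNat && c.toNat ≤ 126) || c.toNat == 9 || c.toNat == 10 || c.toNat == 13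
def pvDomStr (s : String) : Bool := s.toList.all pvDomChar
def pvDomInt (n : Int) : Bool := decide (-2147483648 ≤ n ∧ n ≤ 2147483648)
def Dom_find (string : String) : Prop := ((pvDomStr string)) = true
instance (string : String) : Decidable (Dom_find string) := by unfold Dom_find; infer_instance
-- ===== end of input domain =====

-- B is a simpler single state-machine pass over the characters; equivalence of RETURN values is proved (A is pure).

-- ===== PORT A =====
-- A's while loop: idx advances past each matched '2' and '1'; fuel = length + 1 strictly
-- dominates the number of iterations (idx grows by ≥ 2 per iteration), so fuel never runs out.
def findLoopA (s : String) (fuel : Nat) (idx count : Int) : Int :=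
  match fuel with
  | 0 => count
  | fuel + 1 =>
    if PySem.Str.findFrom s "2" idx ≠ -1 then
      if PySem.Str.findFrom s "1" (PySem.Str.findFrom s "2" idx + 1) ≠ -1 then
        findLoopA s fuel (PySem.Str.findFrom s "1" (PySem.Str.findFrom s "2" idx + 1) + 1) (count + 1)
      else count
    else count

def find (string : String) : Int := findLoopA string (string.toList.length + 1) 0 0

-- ===== PORT B =====
def find_alt (string : String) : Int :=
  (string.toList.foldl
    (fun (st : Int × Bool) ch =>
      if st.2 then (if ch = '2' then (st.1, false) else st)
      else if ch = '1' then (st.1 + 1, true) else st)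
    (0, true)).1

-- ===== PRECONDITION & SPEC =====
def Spec_find (string : String) (out : Int) : Prop := out = find_alt string
instance (string : String) (out : Int) : Decidable (Spec_find string out) := by unfold Spec_find; infer_instance

-- ===== CLAIM (what is proved, stated in full; the proofs are below) =====
def Claim_equal_find : Prop := ∀ (string : String), Dom_find string → Spec_find string (find string)

-- ===== LEMMAS AND PROOFS =====

-- Greedy pair scan with an explicit state: `true` = seeking a '2', `false` = seeking a '1'.
def scan (seek2 : Bool) : List Char → Int
  | [] => 0
  | c :: t =>
    if seek2 then (if c = '2' then scan false t else scan true t)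
    else (if c = '1' then 1 + scan true t else scan false t)

lemma foldl_scan (l : List Char) : ∀ (n : Int) (b : Bool),
    (l.foldl
      (fun (st : Int × Bool) ch =>
        if st.2 then (if ch = '2' then (st.1, false) else st)
        else if ch = '1' then (st.1 + 1, true) else st)
      (n, b)).1 = n + scan b l := by
  induction l with
  | nil => intro n b; simp [scan]
  | cons c t ih =>
    intro n b
    cases b <;> by_cases h : c = '2' <;> by_cases h1 : c = '1' <;>
      simp_all [scan] <;> try ring

lemma singleton_prefix_iff (c : Char) (l : List Char) : [c] <+: l ↔ l.head? = some c := by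
  cases l <;> simp [List.cons_prefix_cons, eq_comm]

-- If the first '2' of l is at index j then the seek-2 scan jumps to seek-1 after it.
lemma scan_true_at : ∀ (j : Nat) (l : List Char),
    (∀ i < j, l[i]? ≠ some '2') → l[j]? = some '2' →
    scan true l = scan false (l.drop (j + 1)) := by
  intro j
  induction j with
  | zero =>
    intro l _ hj
    cases l with
    | nil => simp at hj
    | cons c t => simp at hj; subst hj; simp [scan]
  | succ j ih =>
    intro l hlt hj
    cases l with
    | nil => simp at hj
    | cons c t =>
      have hc : c ≠ '2' := by
        have := hlt 0 (Nat.succ_pos _); simpa using this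
      have := ih t (fun i hi => by
        have := hlt (i + 1) (by omega); simpa using this) (by simpa using hj)
      simpa [scan, hc] using this

lemma scan_false_at : ∀ (j : Nat) (l : List Char),
    (∀ i < j, l[i]? ≠ some '1') → l[j]? = some '1' →
    scan false l = 1 + scan true (l.drop (j + 1)) := by
  intro j
  induction j with
  | zero =>
    intro l _ hj
    cases l with
    | nil => simp at hj
    | cons c t => simp at hj; subst hj; simp [scan]
  | succ j ih =>
    intro l hlt hj
    cases l with
    | nil => simp at hj
    | cons c t =>
      have hc : c ≠ '1' := by
        have := hlt 0 (Nat.succ_pos _); simpa using this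
      have := ih t (fun i hi => by
        have := hlt (i + 1) (by omega); simpa using this) (by simpa using hj)
      simpa [scan, hc] using this

lemma scan_true_none (l : List Char) (h : '2' ∉ l) : scan true l = 0 := by
  induction l with
  | nil => simp [scan]
  | cons c t ih =>
    simp only [List.mem_cons, not_or] at h
    simp [scan, Ne.symm h.1, ih h.2]

lemma scan_false_none (l : List Char) (h : '1' ∉ l) : scan false l = 0 := by
  induction l with
  | nil => simp [scan]
  | cons c t ih =>
    simp only [List.mem_cons, not_or] at h
    simp [scan, Ne.symm h.1, ih h.2]

lemma singleton_infix_iff (c : Char) (l : List Char) : [c] <:+: l ↔ c ∈ l := by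
  constructor
  · rintro ⟨s, t, rfl⟩; simp
  · intro h
    obtain ⟨a, b, rfl⟩ := List.append_of_mem h
    exact ⟨a, b, by simp⟩

-- A `find` hit at j gives: character at j agrees and none before does.
lemma find_hit (l : List Char) (c : Char) (h : PySem.Chars.find l [c] ≠ -1) :
    l[(PySem.Chars.find l [c]).toNat]? = some c ∧
      (∀ i < (PySem.Chars.find l [c]).toNat, l[i]? ≠ some c) ∧
      (PySem.Chars.find l [c]).toNat < l.length := by
  have hpos : 0 ≤ PySem.Chars.find l [c] := by
    rcases lt_or_ge (PySem.Chars.find l [c]) 0 with hlt | hge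
    · exfalso; apply h
      have := PySem.Chars.neg_one_le_find (s := l) (sub := [c]); omega
    · exact hge
  obtain ⟨hpre, hmin⟩ := PySem.Chars.find_spec hpos
  set j := (PySem.Chars.find l [c]).toNat with hjdef
  have hhead : (l.drop j).head? = some c := (singleton_prefix_iff c _).1 hpre
  have hj : l[j]? = some c := by rwa [List.head?_drop] at hhead
  have hlen : j < l.length := by
    by_contra hge
    rw [List.getElem?_eq_none (by omega)] at hj; simp at hj
  refine ⟨hj, fun i hi => ?_, hlen⟩
  intro hic
  exact hmin i hi ((singleton_prefix_iff c _).2 (by rwa [List.head?_drop]))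

-- A `find` miss means the character is absent.
lemma find_miss (l : List Char) (c : Char) (h : PySem.Chars.find l [c] = -1) : c ∉ l := by
  intro hc
  exact (PySem.Chars.find_eq_neg_one_iff (s := l) (sub := [c])).1 h
    ((singleton_infix_iff c l).2 hc)

lemma two_str : ("2" : String).toList = ['2'] := by decide
lemma one_str : ("1" : String).toList = ['1'] := by decide

-- Main invariant for A's loop.
lemma loopA_eq (s : String) : ∀ (fuel k : Nat) (count : Int),
    k ≤ s.toList.length → s.toList.length - k < fuel →
    findLoopA s fuel (k : Int) count = count + scan true (s.toList.drop k) := by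
  intro fuel
  induction fuel with
  | zero => intro k count _ hf; omega
  | succ fuel ih =>
    intro k count hk hf
    set l := s.toList with hl
    rw [findLoopA]
    rw [PySem.Str.findFrom_eq, two_str,
      PySem.Chars.findFrom_natCast l ['2'] k hk]
    by_cases h2 : PySem.Chars.find (l.drop k) ['2'] = -1
    · rw [if_pos h2]
      simp [scan_true_none _ (find_miss _ _ h2)]
    · obtain ⟨hj2, hmin2, hlen2⟩ := find_hit (l.drop k) '2' h2
      set f := (PySem.Chars.find (l.drop k) ['2']).toNat with hfdef
      have hfcast : PySem.Chars.find (l.drop k) ['2'] = (f : Int) := by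
        have := PySem.Chars.neg_one_le_find (s := l.drop k) (sub := ['2']); omega
      have hdl : (l.drop k).length = l.length - k := by simp
      have hk2 : k + f + 1 ≤ l.length := by omega
      have hcast1 : (k : Int) + (f : Int) + 1 = ((k + f + 1 : Nat) : Int) := by push_cast; ring
      rw [if_neg h2, hfcast,
        if_pos (show (k : Int) + (f : Int) ≠ -1 by omega), hcast1]
      rw [PySem.Str.findFrom_eq, one_str,
        PySem.Chars.findFrom_natCast l ['1'] (k + f + 1) hk2]
      have hscan2 : scan true (l.drop k) = scan false (l.drop (k + f + 1)) := by
        rw [scan_true_at f (l.drop k) hmin2 hj2, List.drop_drop]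
        ring_nf
      by_cases h1 : PySem.Chars.find (l.drop (k + f + 1)) ['1'] = -1
      · rw [if_pos h1]
        simp [hscan2, scan_false_none _ (find_miss _ _ h1)]
      · obtain ⟨hj1, hmin1, hlen1⟩ := find_hit (l.drop (k + f + 1)) '1' h1
        set g := (PySem.Chars.find (l.drop (k + f + 1)) ['1']).toNat with hgdef
        have hgcast : PySem.Chars.find (l.drop (k + f + 1)) ['1'] = (g : Int) := by
          have := PySem.Chars.neg_one_le_find (s := l.drop (k + f + 1)) (sub := ['1']); omega
        have hd1 : (l.drop (k + f + 1)).length = l.length - (k + f + 1) := by simp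
        have hk3 : k + f + 1 + g + 1 ≤ l.length := by omega
        have hcast2 : ((k + f + 1 : Nat) : Int) + (g : Int) + 1 = ((k + f + 1 + g + 1 : Nat) : Int) := by
          push_cast; ring
        rw [if_neg h1, hgcast,
          if_pos (show ((k + f + 1 : Nat) : Int) + (g : Int) ≠ -1 by omega)]
        rw [hcast2, ih (k + f + 1 + g + 1) (count + 1) hk3 (by omega)]
        have hscan1 : scan false (l.drop (k + f + 1)) =
            1 + scan true (l.drop (k + f + 1 + g + 1)) := by
          rw [scan_false_at g (l.drop (k + f + 1)) hmin1 hj1, List.drop_drop]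
          ring_nf
        rw [hscan2, hscan1]; ring

-- ===== VERDICT (by name: the statement is the Claim_ definition above) =====
theorem find_spec : Claim_equal_find := by
  intro s _
  unfold Spec_find find find_alt
  rw [foldl_scan s.toList 0 true]
  have h := loopA_eq s (s.toList.length + 1) 0 0 (Nat.zero_le _) (by omega)
  simpa using h
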